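-- pv_equiv track=rewrite | github.com/IrinaDem/Module_2_hard | Module_2_hard.py | find_password
-- ===== SOURCE A (Python) =====
-- def find_password(n):
--     result = ""
--     for d in range(1, n + 1):
--         if n % d == 0:
--             for i in range(1, d // 2 + 1):
--                 j = d - i
--                 if i < j and n % (i + j) == 0:
--                     result += str(i) + str(j)
--
--     return result
-- ===== SOURCE B (Python) =====
-- def find_password(n):
--     # Collect all divisors of n by trial division up to sqrt(n) (O(sqrt n)),
--     # then emit the pair-splits of each divisor in ascending order.
--     divs = set()
--     i = 1
--     while i * i <= n:
--         if n % i == 0: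
--             divs.add(i)
--             divs.add(n // i)
--         i += 1
--     result = ""
--     for d in sorted(divs):
--         for i in range(1, (d + 1) // 2):
--             result += str(i) + str(d - i)
--     return result
-- ===== Notes on version B (the rewrite author's own statement) =====
-- stated objective: alternative
-- what changed: B collects the divisors of n by trial division up to sqrt(n) into a set and sorts them ascending, then emits the pair-splits per divisor unconditionally (the range bound (d+1)//2 replaces A's i<j and redundant n%(i+j)==0 tests), instead of A's scan of every d from 1 to n; intended as faster, measured ~1.47x at the largest timing size (below the 1.5x confirmation bar).
import Mathlib
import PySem

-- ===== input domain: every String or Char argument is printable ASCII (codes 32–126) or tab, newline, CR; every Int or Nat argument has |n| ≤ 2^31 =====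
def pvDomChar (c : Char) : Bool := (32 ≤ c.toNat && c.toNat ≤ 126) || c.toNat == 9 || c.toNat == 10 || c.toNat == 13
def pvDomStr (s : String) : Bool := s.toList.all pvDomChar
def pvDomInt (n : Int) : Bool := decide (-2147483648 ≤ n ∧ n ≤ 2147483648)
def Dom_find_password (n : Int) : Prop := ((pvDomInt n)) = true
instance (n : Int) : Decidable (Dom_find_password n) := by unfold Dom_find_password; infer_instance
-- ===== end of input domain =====

-- B collects the divisors of n by trial division up to sqrt(n) into a set and sorts them
-- ascending, then emits the pair-splits of each divisor unconditionally (alternative algorithm).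

-- ===== PORT A =====
-- inner loop of A: for i in range(1, d//2+1): j = d-i; if i < j and n % (i+j) == 0: result += str(i)+str(j)
def pvInnerA (n d : Int) (result : String) : String :=
  (PySem.List.pyRange 1 (PySem.Int.floordiv d 2 + 1) 1).foldl (fun result i =>
    let j := d - i
    if i < j ∧ PySem.Int.mod n (i + j) = 0 then result ++ (PySem.Int.toStr i ++ PySem.Int.toStr j)
    else result) result

def find_password (n : Int) : String :=
  (PySem.List.pyRange 1 (n + 1) 1).foldl (fun result d =>
    if PySem.Int.mod n d = 0 then pvInnerA n d result else result) ""

-- ===== PORT B =====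
-- while i * i <= n: if n % i == 0: divs.add(i); divs.add(n // i); i += 1
-- (fuel n.toNat + 1 only makes the loop total: i starts at 1 and the guard forces i ≤ n)
def pvCollectDivs (n : Int) : Int → PySem.Set Int → Nat → PySem.Set Int
  | _, divs, 0 => divs
  | i, divs, fuel + 1 =>
    if i * i ≤ n then
      pvCollectDivs n (i + 1)
        (if PySem.Int.mod n i = 0 then
          PySem.Set.add (PySem.Set.add divs i) (PySem.Int.floordiv n i)
         else divs) fuel
    else divs

-- inner loop of B: for i in range(1, (d+1)//2): result += str(i)+str(d-i)
def pvInnerB (d : Int) (result : String) : String :=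
  (PySem.List.pyRange 1 (PySem.Int.floordiv (d + 1) 2) 1).foldl (fun result i =>
    result ++ (PySem.Int.toStr i ++ PySem.Int.toStr (d - i))) result

def find_password_alt (n : Int) : String :=
  (PySem.List.sorted (pvCollectDivs n 1 PySem.Set.empty (n.toNat + 1)) (fun x => x) false).foldl
    (fun result d => pvInnerB d result) ""

-- ===== PRECONDITION & SPEC =====
def Spec_find_password (n : Int) (out : String) : Prop := out = find_password_alt n
instance (n : Int) (out : String) : Decidable (Spec_find_password n out) := by unfold Spec_find_password; infer_instance

-- ===== CLAIM (what is proved, stated in full; the proofs are below) =====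
def Claim_equal_find_password : Prop := ∀ (n : Int), Dom_find_password n → Spec_find_password n (find_password n)

-- ===== LEMMAS AND PROOFS =====

-- the ascending list of positive divisors of n, as A encounters them
def pvDivList (n : Int) : List Int :=
  (PySem.List.pyRange 1 (n + 1) 1).filter (fun d => decide (PySem.Int.mod n d = 0))

lemma pvMem_collect (n : Int) (x : Int) :
    ∀ (fuel : Nat) (i : Int) (s : List Int), 1 ≤ i → (n + 1 - i).toNat ≤ fuel →
    (x ∈ pvCollectDivs n i s fuel ↔
      x ∈ s ∨ ∃ k, i ≤ k ∧ k * k ≤ n ∧ PySem.Int.mod n k = 0 ∧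
        (x = k ∨ x = PySem.Int.floordiv n k)) := by
  intro fuel
  induction fuel with
  | zero =>
    intro i s hi hf
    simp only [pvCollectDivs]
    constructor
    · exact fun h => Or.inl h
    · rintro (h | ⟨k, hik, hkk, -, -⟩)
      · exact h
      · exfalso
        have hni : n + 1 ≤ i := by omega
        nlinarith
  | succ fuel ih =>
    intro i s hi hf
    by_cases hg : i * i ≤ n
    · have hin : i ≤ n := by nlinarith
      simp only [pvCollectDivs, if_pos hg]
      rw [ih (i + 1) _ (by omega) (by omega)]
      by_cases hmod : PySem.Int.mod n i = 0
      · simp only [if_pos hmod, PySem.Set.mem_add]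
        constructor
        · rintro (((hs | hx) | hx) | ⟨k, hik, hkk, hm, hx⟩)
          · exact Or.inl hs
          · exact Or.inr ⟨i, le_refl i, hg, hmod, Or.inl hx⟩
          · exact Or.inr ⟨i, le_refl i, hg, hmod, Or.inr hx⟩
          · exact Or.inr ⟨k, by omega, hkk, hm, hx⟩
        · rintro (hs | ⟨k, hik, hkk, hm, hx⟩)
          · exact Or.inl (Or.inl (Or.inl hs))
          · rcases eq_or_lt_of_le hik with hki | hki
            · rcases hx with hx | hx
              · exact Or.inl (Or.inl (Or.inr (by omega)))
              · exact Or.inl (Or.inr (by rw [hx, ← hki]))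
            · exact Or.inr ⟨k, by omega, hkk, hm, hx⟩
      · simp only [if_neg hmod]
        constructor
        · rintro (hs | ⟨k, hik, hkk, hm, hx⟩)
          · exact Or.inl hs
          · exact Or.inr ⟨k, by omega, hkk, hm, hx⟩
        · rintro (hs | ⟨k, hik, hkk, hm, hx⟩)
          · exact Or.inl hs
          · rcases eq_or_lt_of_le hik with hki | hki
            · exact absurd (hki ▸ hm) hmod
            · exact Or.inr ⟨k, by omega, hkk, hm, hx⟩
    · simp only [pvCollectDivs, if_neg hg]
      constructor
      · exact fun h => Or.inl h
      · rintro (h | ⟨k, hik, hkk, -, -⟩)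
        · exact h
        · exfalso; nlinarith

lemma pvNodup_collect (n : Int) :
    ∀ (fuel : Nat) (i : Int) (s : List Int), s.Nodup → (pvCollectDivs n i s fuel).Nodup := by
  intro fuel
  induction fuel with
  | zero => intro i s hs; simpa [pvCollectDivs] using hs
  | succ fuel ih =>
    intro i s hs
    simp only [pvCollectDivs]
    split
    · apply ih
      split
      · exact PySem.Set.nodup_add _ _ (PySem.Set.nodup_add _ _ hs)
      · exact hs
    · exact hs

-- the sqrt-bounded pairing characterisation of divisors
lemma pvDivisor_char (n x : Int) :
    (∃ k, 1 ≤ k ∧ k * k ≤ n ∧ PySem.Int.mod n k = 0 ∧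
      (x = k ∨ x = PySem.Int.floordiv n k)) ↔
    (1 ≤ x ∧ x < n + 1 ∧ PySem.Int.mod n x = 0) := by
  constructor
  · rintro ⟨k, hk1, hkk, hm, hx⟩
    have hk0 : (0:Int) < k := by omega
    have hdvd : k ∣ n := (PySem.Int.mod_eq_zero_iff_dvd n k).mp hm
    have hq : k * PySem.Int.floordiv n k = n := by
      rw [PySem.Int.floordiv_eq_ediv_of_pos hk0]
      exact Int.mul_ediv_cancel' hdvd
    rcases hx with hx | hx
    · subst hx
      exact ⟨hk1, by nlinarith, hm⟩
    · subst hx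
      set q := PySem.Int.floordiv n k with hqdef
      have hn1 : (1:Int) ≤ n := by nlinarith
      have hq1 : (1:Int) ≤ q := by nlinarith
      refine ⟨hq1, by nlinarith, ?_⟩
      exact (PySem.Int.mod_eq_zero_iff_dvd n q).mpr ⟨k, by linarith [hq, mul_comm k q]⟩
  · rintro ⟨hx1, hxn, hm⟩
    have hx0 : (0:Int) < x := by omega
    have hdvd : x ∣ n := (PySem.Int.mod_eq_zero_iff_dvd n x).mp hm
    have hq : x * PySem.Int.floordiv n x = n := by
      rw [PySem.Int.floordiv_eq_ediv_of_pos hx0]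
      exact Int.mul_ediv_cancel' hdvd
    by_cases hxx : x * x ≤ n
    · exact ⟨x, hx1, hxx, hm, Or.inl rfl⟩
    · set q := PySem.Int.floordiv n x with hqdef
      have hq1 : (1:Int) ≤ q := by nlinarith
      have hqx : q < x := by nlinarith
      have hq0 : (0:Int) < q := by omega
      refine ⟨q, hq1, by nlinarith, ?_, Or.inr ?_⟩
      · exact (PySem.Int.mod_eq_zero_iff_dvd n q).mpr ⟨x, by linarith [hq, mul_comm x q]⟩
      · rw [PySem.Int.floordiv_eq_ediv_of_pos hq0]
        have : q * x = n := by linarith [hq, mul_comm x q]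
        rw [← this, Int.mul_ediv_cancel_left _ (by omega)]

lemma pvSorted_collect_eq (n : Int) :
    PySem.List.sorted (pvCollectDivs n 1 PySem.Set.empty (n.toNat + 1)) (fun x => x) false
      = pvDivList n := by
  unfold pvDivList
  apply PySem.List.sorted_eq_of_perm_of_pairwise_lt
  · rw [List.perm_ext_iff_of_nodup
      ((PySem.List.nodup_pyRange_one 1 (n + 1)).filter _)
      (pvNodup_collect n _ 1 PySem.Set.empty List.nodup_nil)]
    intro x
    rw [pvMem_collect n x (n.toNat + 1) 1 PySem.Set.empty le_rfl (by omega)]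
    simp only [List.mem_filter, PySem.List.mem_pyRange_one, decide_eq_true_eq,
      PySem.Set.empty, List.not_mem_nil, false_or]
    rw [pvDivisor_char n x]
    tauto
  · exact (PySem.List.pairwise_lt_pyRange_one 1 (n + 1)).filter _

-- inside the inner loop of A, on a divisor d, the guard reduces to i < d - i,
-- and the surviving indices are exactly range(1, (d+1)//2)
lemma pvInner_eq (n d : Int) (hd1 : 1 ≤ d) (hm : PySem.Int.mod n d = 0) (result : String) :
    pvInnerA n d result = pvInnerB d result := by
  unfold pvInnerA pvInnerB
  have hstep : ∀ (acc : String), ∀ i ∈ PySem.List.pyRange 1 (PySem.Int.floordiv d 2 + 1) 1,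
      (let j := d - i
       if i < j ∧ PySem.Int.mod n (i + j) = 0 then acc ++ (PySem.Int.toStr i ++ PySem.Int.toStr j)
       else acc)
      = if i < d - i then acc ++ (PySem.Int.toStr i ++ PySem.Int.toStr (d - i)) else acc := by
    intro acc i _
    have : i + (d - i) = d := by ring
    simp only [this, hm, and_true]
  rw [PySem.List.foldl_congr_mem' _ _ _ _ (fun i hi acc => hstep acc i hi),
    PySem.List.foldl_ite_eq_foldl_filter]
  have h2 : PySem.Int.floordiv d 2 = d / 2 := PySem.Int.floordiv_eq_ediv_of_pos (by omega)
  have h2' : PySem.Int.floordiv (d + 1) 2 = (d + 1) / 2 := PySem.Int.floordiv_eq_ediv_of_pos (by omega)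
  have hsplit : PySem.List.pyRange 1 (PySem.Int.floordiv d 2 + 1) 1
      = PySem.List.pyRange 1 (PySem.Int.floordiv (d + 1) 2) 1
        ++ PySem.List.pyRange (PySem.Int.floordiv (d + 1) 2) (PySem.Int.floordiv d 2 + 1) 1 := by
    rw [PySem.List.pyRange_one_append 1 (PySem.Int.floordiv (d + 1) 2) (PySem.Int.floordiv d 2 + 1)
      (by rw [h2']; omega) (by rw [h2, h2']; omega)]
  rw [hsplit, List.filter_append]
  rw [List.filter_eq_self.mpr (by
    intro i hi
    rw [PySem.List.mem_pyRange_one] at hi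
    rw [h2'] at hi
    simp only [decide_eq_true_eq]
    omega)]
  rw [List.filter_eq_nil_iff.mpr (by
    intro i hi
    rw [PySem.List.mem_pyRange_one] at hi
    rw [h2'] at hi
    simp only [decide_eq_true_eq]
    omega), List.append_nil]

lemma pvA_eq_foldl_divs (n : Int) :
    find_password n = (pvDivList n).foldl (fun result d => pvInnerA n d result) "" := by
  unfold find_password pvDivList
  rw [PySem.List.foldl_ite_eq_foldl_filter]

-- ===== VERDICT (by name: the statement is the Claim_ definition above) =====
theorem find_password_spec : Claim_equal_find_password := by
  intro n _
  unfold Spec_find_password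
  rw [pvA_eq_foldl_divs, find_password_alt, pvSorted_collect_eq]
  apply PySem.List.foldl_congr_mem'
  intro d hd acc
  simp only [pvDivList, List.mem_filter, PySem.List.mem_pyRange_one, decide_eq_true_eq] at hd
  exact pvInner_eq n d hd.1.1 hd.2 acc
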